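-- pv_equiv track=rewrite | github.com/Vinayak150/LeetcodeProblems- | 3823-reverse-letters-then-special-characters-in-a-string/3823-reverse-letters-then-special-characters-in-a-string.py | reverseByType
-- ===== SOURCE A (Python) =====
-- def reverseByType(s: str) -> str:
--     letters = []
--     specials = []
--     for ch in s:
--         if 'a' <= ch <= 'z':
--             letters.append(ch)
--         else:
--             specials.append(ch)
--
--     letters.reverse()
--     specials.reverse()
--
--     res =[]
--     l =0
--     sp =0
--     for ch in s:
--         if 'a' <= ch <= 'z':
--             res.append(letters[l])
--             l +=1
--         else:
--             res.append(specials[sp])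
--             sp += 1
--     return "".join(res)
-- ===== SOURCE B (Python) =====
-- def reverseByType(s: str) -> str:
--     # Single pass over s, lazily pulling the next same-class character from the
--     # reversed string via two independent skip pointers (no bucket lists).
--     rev = s[::-1]
--     out = []
--     li = 0
--     si = 0
--     for ch in s:
--         if 'a' <= ch <= 'z':
--             while not ('a' <= rev[li] <= 'z'):
--                 li += 1
--             out.append(rev[li])
--             li += 1
--         else:
--             while 'a' <= rev[si] <= 'z':
--                 si += 1
--             out.append(rev[si])
--             si += 1
--     return "".join(out)
-- ===== Notes on version B (the rewrite author's own statement) =====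
-- stated objective: alternative
-- what changed: Replaces A's collect-two-buckets, reverse, then indexed-redistribute (three passes with two intermediate lists) by a single forward pass that lazily pulls the next same-class character out of the reversed string with two independent skip pointers.
import Mathlib
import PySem

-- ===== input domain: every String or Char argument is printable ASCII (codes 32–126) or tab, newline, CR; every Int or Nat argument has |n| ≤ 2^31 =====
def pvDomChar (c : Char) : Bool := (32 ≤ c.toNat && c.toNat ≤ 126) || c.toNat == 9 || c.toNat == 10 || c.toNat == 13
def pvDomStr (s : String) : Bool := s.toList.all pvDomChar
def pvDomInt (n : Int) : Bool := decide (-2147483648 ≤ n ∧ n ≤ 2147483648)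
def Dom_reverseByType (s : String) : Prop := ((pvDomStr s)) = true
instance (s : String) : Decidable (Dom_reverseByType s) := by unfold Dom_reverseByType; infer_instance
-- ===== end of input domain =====

-- B replaces A's collect-two-buckets/reverse/redistribute with one pass pulling the
-- next same-class char from the reversed string via two skip pointers (objective: alternative).

-- 'a' <= ch <= 'z' (both Pythons use exactly this test)
def isLow (c : Char) : Bool := 'a' ≤ c && c ≤ 'z'

-- ===== PORT A =====
-- first loop: partition into letters/specials by appending (literal)
def splitLoop : List Char × List Char → List Char → List Char × List Char
  | acc, [] => acc
  | (ls, ss), ch :: t =>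
    if isLow ch then splitLoop (ls ++ [ch], ss) t else splitLoop (ls, ss ++ [ch]) t

-- second loop: rebuild res with index counters l, sp (letters[l] / specials[sp];
-- the indices are provably always in range, so getD's default is never used)
def loop2A (L S : List Char) : List Char → Nat → Nat → List Char
  | [], _, _ => []
  | ch :: t, l, sp =>
    if isLow ch then L.getD l ' ' :: loop2A L S t (l + 1) sp
    else S.getD sp ' ' :: loop2A L S t l (sp + 1)

def reverseByType (s : String) : String :=
  let p := splitLoop ([], []) s.toList
  let L := p.1.reverse
  let S := p.2.reverse
  String.ofList (loop2A L S s.toList 0 0)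

-- ===== PORT B =====
-- 'while cont(rev[i]): i += 1' (never runs past the end on reachable states)
def skipIdx (cont : Char → Bool) (rev : List Char) (i : Nat) : Nat :=
  if h : i < rev.length then
    if cont (rev.getD i ' ') then skipIdx cont rev (i + 1) else i
  else i
termination_by rev.length - i

-- the single pass of Source B, with the two skip pointers li, si into rev
def loopB (rev : List Char) : List Char → Nat → Nat → List Char
  | [], _, _ => []
  | ch :: t, li, si =>
    if isLow ch then
      rev.getD (skipIdx (fun c => !isLow c) rev li) ' ' ::
        loopB rev t (skipIdx (fun c => !isLow c) rev li + 1) si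
    else
      rev.getD (skipIdx isLow rev si) ' ' ::
        loopB rev t li (skipIdx isLow rev si + 1)

def reverseByType_alt (s : String) : String :=
  let rev := s.toList.reverse      -- s[::-1]
  String.ofList (loopB rev s.toList 0 0)

-- ===== PRECONDITION & SPEC =====
def Spec_reverseByType (s : String) (out : String) : Prop := out = reverseByType_alt s
instance (s : String) (out : String) : Decidable (Spec_reverseByType s out) := by unfold Spec_reverseByType; infer_instance

-- ===== CLAIM (what is proved, stated in full; the proofs are below) =====
def Claim_equal_reverseByType : Prop := ∀ (s : String), Dom_reverseByType s → Spec_reverseByType s (reverseByType s)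

-- ===== LEMMAS AND PROOFS =====

-- common normal form: merge the two (reversed-filter) streams back along the class pattern
def mergeP : List Char → List Char → List Char → List Char
  | _, _, [] => []
  | ls, ss, ch :: t =>
    if isLow ch then ls.headD ' ' :: mergeP ls.tail ss t
    else ss.headD ' ' :: mergeP ls ss.tail t

theorem getD_eq_headD_drop (l : List Char) (n : Nat) :
    l.getD n ' ' = (l.drop n).headD ' ' := by
  induction l generalizing n with
  | nil => simp
  | cons c t ih => cases n with
    | zero => simp
    | succ m => simp

theorem splitLoop_eq (t ls ss : List Char) :
    splitLoop (ls, ss) t = (ls ++ t.filter isLow, ss ++ t.filter (fun c => !isLow c)) := by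
  induction t generalizing ls ss with
  | nil => simp [splitLoop]
  | cons c r ih =>
    by_cases h : isLow c <;> simp [splitLoop, h, ih]

theorem loop2A_eq (L S : List Char) (t : List Char) (l sp : Nat) :
    loop2A L S t l sp = mergeP (L.drop l) (S.drop sp) t := by
  induction t generalizing l sp with
  | nil => simp [loop2A, mergeP]
  | cons c r ih =>
    by_cases h : isLow c <;>
      simp [loop2A, mergeP, h, ih, List.tail_drop]

theorem skipIdx_eq (cont : Char → Bool) (rev : List Char) (i : Nat) :
    skipIdx cont rev i = i + ((rev.drop i).takeWhile cont).length := by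
  by_cases h : i < rev.length
  · rw [skipIdx, dif_pos h]
    have hg : rev.getD i ' ' = rev[i] := by
      simp [List.getD, List.getElem?_eq_getElem h]
    rw [hg, List.drop_eq_getElem_cons h, List.takeWhile_cons]
    by_cases hc : cont rev[i]
    · rw [if_pos hc, if_pos hc, skipIdx_eq cont rev (i + 1)]
      simp; omega
    · rw [if_neg hc, if_neg hc]
      simp
  · rw [skipIdx, dif_neg h]
    have : rev.drop i = [] := List.drop_eq_nil_of_le (by omega)
    simp [this]
termination_by rev.length - i

-- extracting the next p-char by skipping ¬p-chars = taking the head of the p-filter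
theorem extract_step (p cont : Char → Bool) (hpc : ∀ c, cont c = !p c) (l : List Char) :
    l.getD ((l.takeWhile cont).length) ' ' = (l.filter p).headD ' ' ∧
    (l.drop ((l.takeWhile cont).length + 1)).filter p = (l.filter p).tail := by
  induction l with
  | nil => simp
  | cons c t ih =>
    by_cases hp : p c
    · simp [hpc, hp]
    · have : cont c = true := by simp [hpc, hp]
      simp only [List.takeWhile_cons, this, if_true, List.length_cons, List.filter_cons]
      simpa [hp] using ih

theorem loopB_eq (rev : List Char) (t : List Char) (li si : Nat) :
    loopB rev t li si =
      mergeP ((rev.drop li).filter isLow) ((rev.drop si).filter (fun c => !isLow c)) t := by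
  induction t generalizing li si with
  | nil => simp [loopB, mergeP]
  | cons c r ih =>
    by_cases h : isLow c
    · have hskip := skipIdx_eq (fun c => !isLow c) rev li
      have hext := extract_step isLow (fun c => !isLow c) (fun _ => rfl) (rev.drop li)
      rw [loopB, if_pos h, mergeP, if_pos h, ih, hskip]
      rw [getD_eq_headD_drop, ← List.drop_drop, ← getD_eq_headD_drop, hext.1,
        Nat.add_assoc, ← List.drop_drop, hext.2]
    · have hskip := skipIdx_eq isLow rev si
      have hext := extract_step (fun c => !isLow c) isLow
        (fun c => by simp) (rev.drop si)
      rw [loopB, if_neg h, mergeP, if_neg h, ih, hskip]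
      rw [getD_eq_headD_drop, ← List.drop_drop, ← getD_eq_headD_drop, hext.1,
        Nat.add_assoc, ← List.drop_drop, hext.2]

theorem reverseByType_eq_merge (s : String) :
    reverseByType s =
      String.ofList (mergeP ((s.toList.filter isLow).reverse)
        ((s.toList.filter (fun c => !isLow c)).reverse) s.toList) := by
  simp [reverseByType, splitLoop_eq, loop2A_eq]

theorem reverseByType_alt_eq_merge (s : String) :
    reverseByType_alt s =
      String.ofList (mergeP ((s.toList.filter isLow).reverse)
        ((s.toList.filter (fun c => !isLow c)).reverse) s.toList) := by
  simp [reverseByType_alt, loopB_eq, List.filter_reverse]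

-- ===== VERDICT (by name: the statement is the Claim_ definition above) =====
theorem reverseByType_spec : Claim_equal_reverseByType := by
  intro s _
  unfold Spec_reverseByType
  rw [reverseByType_eq_merge, reverseByType_alt_eq_merge]
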